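-- pv_equiv track=rewrite | github.com/namel3ss-Ai/namel3ss | src/namel3ss/runtime/capabilities/validation.py | _dedupe_diagnostics
-- ===== SOURCE A (Python) =====
-- def _dedupe_diagnostics(entries: list[dict[str, str]]) -> list[dict[str, str]]:
--     deduped: dict[str, dict[str, str]] = {}
--     for entry in entries:
--         code = str(entry.get("stable_code") or "").strip()
--         if not code:
--             continue
--         deduped.setdefault(code, entry)
--     return [deduped[key] for key in sorted(deduped)]
-- ===== SOURCE B (Python) =====
-- def _dedupe_diagnostics(entries: list[dict[str, str]]) -> list[dict[str, str]]:
--     pairs = sorted(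
--         (p for p in ((str(e.get("stable_code") or "").strip(), e) for e in entries) if p[0]),
--         key=lambda p: p[0],
--     )
--     result = []
--     prev = None
--     for code, entry in pairs:
--         if code != prev:
--             result.append(entry)
--             prev = code
--     return result
-- ===== Notes on version B (the rewrite author's own statement) =====
-- stated objective: alternative
-- what changed: Replaces the dict-index-then-sort-keys shape with filter-then-stable-sort-then-one-pass-run-dedup: pairs (code, entry) are stably sorted by code and only the first entry of each equal-code run is emitted.
import Mathlib
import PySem

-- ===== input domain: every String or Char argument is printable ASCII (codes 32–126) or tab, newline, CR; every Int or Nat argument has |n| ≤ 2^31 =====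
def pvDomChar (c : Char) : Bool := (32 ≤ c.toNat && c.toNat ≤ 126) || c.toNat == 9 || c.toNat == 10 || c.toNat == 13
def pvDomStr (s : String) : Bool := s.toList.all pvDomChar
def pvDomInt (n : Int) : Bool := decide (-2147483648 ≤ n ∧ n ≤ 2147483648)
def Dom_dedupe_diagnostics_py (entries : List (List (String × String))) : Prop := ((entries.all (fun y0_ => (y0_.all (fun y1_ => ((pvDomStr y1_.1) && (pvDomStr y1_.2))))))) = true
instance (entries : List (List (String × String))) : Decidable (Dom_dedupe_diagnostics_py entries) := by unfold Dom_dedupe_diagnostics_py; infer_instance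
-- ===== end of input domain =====

-- B replaces A's dict-index-then-sort-keys shape by filter, stable sort by code, and a one-pass
-- run dedup keeping the first entry of each equal-code run (objective: alternative decomposition).

-- ===== PORT A =====
-- `entry.get("stable_code") or ""`: a missing key and an empty-string value both yield "" → (List.lookup …).getD "";
-- str(…) is the identity on these str values. `deduped[key]` with key drawn from the dict itself → getD is exact.
def dedupe_diagnostics_py (entries : List (List (String × String))) : List (List (String × String)) :=
  let deduped := entries.foldl (fun d entry =>
    let code := PySem.Str.strip ((List.lookup "stable_code" entry).getD "")
    if code = "" then d
    else d.setdefault code entry) PySem.Dict.empty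
  (PySem.List.sorted deduped.keys (fun k => k) false).map (fun key => deduped.getD key [])

-- ===== PORT B =====
-- normalized code of one entry: str(e.get("stable_code") or "").strip()
def pvNormCode (entry : List (String × String)) : String :=
  PySem.Str.strip ((List.lookup "stable_code" entry).getD "")

def dedupe_diagnostics_py_alt (entries : List (List (String × String))) : List (List (String × String)) :=
  let pairs := PySem.List.sorted
    ((entries.map (fun e => (pvNormCode e, e))).filter (fun p => !(p.1 == "")))
    (fun p => p.1) false
  (pairs.foldl (fun (acc : List (List (String × String)) × Option String) p =>
      if some p.1 ≠ acc.2 then (acc.1 ++ [p.2], some p.1) else acc) ([], none)).1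

-- ===== PRECONDITION & SPEC =====
def Spec_dedupe_diagnostics_py (entries : List (List (String × String))) (out : List (List (String × String))) : Prop := out = dedupe_diagnostics_py_alt entries
instance (entries : List (List (String × String))) (out : List (List (String × String))) : Decidable (Spec_dedupe_diagnostics_py entries out) := by unfold Spec_dedupe_diagnostics_py; infer_instance

-- ===== CLAIM (what is proved, stated in full; the proofs are below) =====
def Claim_equal_dedupe_diagnostics_py : Prop := ∀ (entries : List (List (String × String))), Dom_dedupe_diagnostics_py entries → Spec_dedupe_diagnostics_py entries (dedupe_diagnostics_py entries)

-- ===== LEMMAS AND PROOFS =====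

-- the filtered (code, entry) list both programs conceptually work over
def pvPairs (entries : List (List (String × String))) : List (String × List (String × String)) :=
  (entries.map (fun e => (pvNormCode e, e))).filter (fun p => !(p.1 == ""))

-- recursive form of B's emission loop
def pvRun (prev : Option String) : List (String × List (String × String)) → List (List (String × String))
  | [] => []
  | p :: t => if some p.1 ≠ prev then p.2 :: pvRun (some p.1) t else pvRun prev t

-- ----- A-side characterisation -----

theorem foldl_eq_pairs_foldl (entries : List (List (String × String)))
    (d : PySem.Dict String (List (String × String))) :
    entries.foldl (fun d entry =>
      let code := PySem.Str.strip ((List.lookup "stable_code" entry).getD "")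
      if code = "" then d else d.setdefault code entry) d
    = (pvPairs entries).foldl (fun d p => d.setdefault p.1 p.2) d := by
  induction entries generalizing d with
  | nil => rfl
  | cons e es ih =>
    simp only [List.foldl_cons, pvPairs, List.map_cons, List.filter_cons]
    by_cases h : pvNormCode e = ""
    · simp only [pvNormCode] at h
      simp [h, pvNormCode] at *
      rw [ih]; rfl
    · simp only [pvNormCode] at h
      simp [h, pvNormCode] at *
      rw [ih]; rfl

theorem get?_foldl_setdefault (l : List (String × List (String × String)))
    (d : PySem.Dict String (List (String × String))) (c : String) :
    (l.foldl (fun d p => d.setdefault p.1 p.2) d).get? c = (d.get? c).or (List.lookup c l) := by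
  induction l generalizing d with
  | nil => simp [List.lookup]
  | cons p t ih =>
    rw [List.foldl_cons, ih]
    have hsome : (d.get? c).isSome = d.contains c := by
      simp only [PySem.Dict.get?, PySem.Dict.contains, Option.isSome_map]
      exact List.isSome_find?
    have hset : (d.setdefault p.1 p.2).get? c
        = (d.get? c).or (if p.1 == c then some p.2 else none) := by
      by_cases he : p.1 = c
      · subst he
        by_cases hc : d.contains p.1
        · obtain ⟨v, hv⟩ := Option.isSome_iff_exists.mp (hsome ▸ hc)
          simp [PySem.Dict.setdefault, hc, hv]
        · simp only [Bool.not_eq_true] at hc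
          have hfind : List.find? (fun q => q.1 == p.1) d.items = none := by
            have := hsome.trans hc
            simpa only [PySem.Dict.get?, Option.isSome_map, Option.isSome_eq_false_iff,
              Option.isNone_iff_eq_none] using this
          simp [PySem.Dict.setdefault, hc, PySem.Dict.get?, List.find?_append, hfind, List.find?]
      · have hifn : (if p.1 == c then some p.2 else none) = none := by simp [he]
        rw [hifn, Option.or_none]
        by_cases hc : d.contains p.1
        · simp [PySem.Dict.setdefault, hc]
        · simp only [Bool.not_eq_true] at hc
          have hb : (p.1 == c) = false := by simp [he]
          simp [PySem.Dict.setdefault, hc, PySem.Dict.get?, List.find?_append, List.find?, hb]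
    rw [hset, Option.or_assoc]
    congr 1
    simp only [List.lookup]
    by_cases he : c = p.1
    · simp [he]
    · have h1 : (p.1 == c) = false := by simp [Ne.symm he]
      have h2 : (c == p.1) = false := by simp [he]
      rw [h1, h2]
      simp

theorem keys_foldl_setdefault (l : List (String × List (String × String)))
    (d : PySem.Dict String (List (String × String))) :
    (l.foldl (fun d p => d.setdefault p.1 p.2) d).keys
      = (l.map Prod.fst).foldl PySem.Set.add d.keys := by
  induction l generalizing d with
  | nil => rfl
  | cons p t ih =>
    rw [List.foldl_cons, ih, List.map_cons, List.foldl_cons]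
    congr 1
    by_cases hc : d.contains p.1
    · have : d.keys.contains p.1 := by
        simp only [PySem.Dict.contains, List.any_eq_true] at hc
        obtain ⟨q, hq, hq2⟩ := hc
        simp only [PySem.Dict.keys, List.contains_eq_any_beq, List.any_eq_true]
        exact ⟨q.1, List.mem_map_of_mem hq, by simpa [BEq.comm] using hq2⟩
      simp only [PySem.Dict.setdefault, hc, if_true, PySem.Set.add, PySem.Set.contains, this, if_true]
    · simp only [Bool.not_eq_true] at hc
      have hmem : p.1 ∉ d.keys := by
        intro hm
        simp only [PySem.Dict.keys, List.mem_map] at hm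
        obtain ⟨q, hq, hq1⟩ := hm
        have : d.contains p.1 = true := by
          simp only [PySem.Dict.contains, List.any_eq_true]
          exact ⟨q, hq, by simp [hq1]⟩
        simp [this] at hc
      have hcf : d.keys.contains p.1 = false := by
        rw [Bool.eq_false_iff]
        intro hb
        exact hmem (by simpa using hb)
      have hcf' : (List.map (fun x => x.1) d.items).contains p.1 = false := hcf
      simp only [PySem.Dict.setdefault, hc, Bool.false_eq_true, if_false, PySem.Set.add,
        PySem.Set.contains, hcf', PySem.Dict.keys, List.map_append, List.map_cons, List.map_nil]

theorem a_char (entries : List (List (String × String))) :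
    dedupe_diagnostics_py entries
      = (PySem.List.sorted (PySem.Set.ofList ((pvPairs entries).map Prod.fst)) (fun k => k) false).map
          (fun c => (List.lookup c (pvPairs entries)).getD []) := by
  show (PySem.List.sorted _ _ false).map _ = _
  rw [foldl_eq_pairs_foldl, keys_foldl_setdefault]
  have hkeys : (PySem.Dict.empty (κ := String) (ν := List (String × String))).keys = [] := rfl
  rw [hkeys]
  have hof : ((pvPairs entries).map Prod.fst).foldl PySem.Set.add ([] : List String)
      = PySem.Set.ofList ((pvPairs entries).map Prod.fst) := rfl
  rw [hof]
  apply List.map_congr_left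
  intro k _
  rw [PySem.Dict.getD_eq_get?_getD, get?_foldl_setdefault]
  rfl

-- ----- B-side characterisation -----

theorem foldl_eq_run (l : List (String × List (String × String)))
    (acc : List (List (String × String))) (prev : Option String) :
    (l.foldl (fun (acc : List (List (String × String)) × Option String) p =>
        if some p.1 ≠ acc.2 then (acc.1 ++ [p.2], some p.1) else acc) (acc, prev)).1
      = acc ++ pvRun prev l := by
  induction l generalizing acc prev with
  | nil => simp [pvRun]
  | cons p t ih =>
    rw [List.foldl_cons]
    by_cases h : some p.1 ≠ prev
    · rw [if_pos h, ih]
      simp only [pvRun, if_pos h, List.append_assoc, List.singleton_append]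
    · rw [if_neg h, ih]
      simp only [pvRun, if_neg h]

theorem lookup_insertBy (x : String × List (String × String))
    (ys : List (String × List (String × String))) (c : String)
    (h : ys.Pairwise (fun a b => a.1 ≤ b.1)) :
    List.lookup c (PySem.List.insertBy (fun a b => decide (a.1 < b.1)) x ys)
      = (List.lookup c ys).or (if x.1 == c then some x.2 else none) := by
  induction ys with
  | nil =>
    simp only [PySem.List.insertBy, List.lookup, Option.none_or]
    by_cases he : c = x.1
    · simp [he]
    · rw [show (c == x.1) = false from by simp [he],
        show (x.1 == c) = false from by simp [Ne.symm he]]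
      simp
  | cons y t ih =>
    have hy : ∀ z ∈ t, y.1 ≤ z.1 := (List.pairwise_cons.mp h).1
    have ht := (List.pairwise_cons.mp h).2
    by_cases hlt : x.1 < y.1
    · rw [show PySem.List.insertBy (fun a b => decide (a.1 < b.1)) x (y :: t)
          = x :: y :: t from by simp [PySem.List.insertBy, hlt]]
      by_cases he : c = x.1
      · have hnone : List.lookup c (y :: t) = none := by
          rw [List.lookup_eq_none_iff]
          intro p hp
          have h1 : y.1 ≤ p.1 := by
            rcases List.mem_cons.mp hp with h1 | h1
            · exact h1 ▸ le_refl _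
            · exact hy p h1
          have h2 : c < p.1 := lt_of_lt_of_le (he ▸ hlt) h1
          simp only [bne_iff_ne]
          exact ne_of_lt h2
        rw [show List.lookup c (x :: y :: t) = some x.2 from by simp [List.lookup, he],
          hnone, show (x.1 == c) = true from by simp [he]]
        simp
      · have hL : List.lookup c (x :: y :: t) = List.lookup c (y :: t) := by
          simp only [List.lookup]
          rw [show (c == x.1) = false from by simp [he]]
        rw [hL, show (x.1 == c) = false from by simp [Ne.symm he]]
        simp
    · rw [show PySem.List.insertBy (fun a b => decide (a.1 < b.1)) x (y :: t)
          = y :: PySem.List.insertBy (fun a b => decide (a.1 < b.1)) x t from by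
            simp [PySem.List.insertBy, hlt]]
      simp only [List.lookup]
      by_cases he : c = y.1
      · rw [show (c == y.1) = true from by simp [he]]
        simp
      · rw [show (c == y.1) = false from by simp [he], ih ht]

theorem lookup_sorted (l : List (String × List (String × String))) (c : String) :
    List.lookup c (PySem.List.sorted l (fun p => p.1) false) = List.lookup c l := by
  induction l using List.reverseRecOn with
  | nil => rfl
  | append_singleton t x ih =>
    have hs : PySem.List.sorted (t ++ [x]) (fun p => p.1) false
        = PySem.List.insertBy (fun a b => decide (a.1 < b.1)) x
            (PySem.List.sorted t (fun p => p.1) false) := by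
      rw [PySem.List.sorted_eq_foldl_insertBy, PySem.List.sorted_eq_foldl_insertBy, List.foldl_append, List.foldl_cons, List.foldl_nil]
    rw [hs, lookup_insertBy x _ c (PySem.List.sorted_pairwise t (fun p => p.1)), ih, List.lookup_append]
    congr 1
    by_cases he : c = x.1
    · simp [List.lookup, he]
    · rw [show (x.1 == c) = false from by simp [Ne.symm he]]
      simp only [List.lookup]
      rw [show (c == x.1) = false from by simp [he]]
      simp

theorem run_skip (c : String) (l : List (String × List (String × String))) :
    pvRun (some c) l = pvRun none (l.dropWhile (fun p => p.1 == c)) := by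
  induction l with
  | nil => rfl
  | cons p t ih =>
    by_cases h : p.1 = c
    · subst h
      simp [pvRun, ih]
    · have hb : (p.1 == c) = false := by simpa using h
      simp only [List.dropWhile_cons, hb, Bool.false_eq_true, if_false]
      simp only [pvRun]
      simp [h]

theorem dropWhile_gt (c : String) (l : List (String × List (String × String)))
    (hpw : l.Pairwise (fun a b => a.1 ≤ b.1)) (hge : ∀ z ∈ l, c ≤ z.1) :
    ∀ p ∈ l.dropWhile (fun p => p.1 == c), c < p.1 := by
  induction l with
  | nil => simp
  | cons a t ih =>
    by_cases ha : a.1 = c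
    · rw [List.dropWhile_cons, if_pos (by simp [ha])]
      exact ih (List.pairwise_cons.mp hpw).2 (fun z hz => hge z (List.mem_cons_of_mem a hz))
    · rw [List.dropWhile_cons, if_neg (by simp [ha])]
      intro p hp
      have hca : c < a.1 := lt_of_le_of_ne (hge a (List.mem_cons_self)) (Ne.symm ha)
      rcases List.mem_cons.mp hp with h' | h'
      · exact h' ▸ hca
      · exact lt_of_lt_of_le hca ((List.pairwise_cons.mp hpw).1 p h')

theorem run_spec (n : Nat) (qs : List (String × List (String × String))) (S : List String)
    (hn : qs.length ≤ n)
    (h1 : qs.Pairwise (fun a b => a.1 ≤ b.1))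
    (h2 : S.Pairwise (· < ·))
    (h3 : ∀ c, c ∈ S ↔ c ∈ qs.map Prod.fst) :
    pvRun none qs = S.map (fun c => (List.lookup c qs).getD []) := by
  induction n generalizing qs S with
  | zero =>
    have hq : qs = [] := List.eq_nil_of_length_eq_zero (Nat.le_zero.mp hn)
    subst hq
    have hS : S = [] := List.eq_nil_iff_forall_not_mem.mpr (fun c hc => by simpa using (h3 c).mp hc)
    subst hS
    rfl
  | succ n ih =>
    cases qs with
    | nil =>
      have hS : S = [] := List.eq_nil_iff_forall_not_mem.mpr (fun c hc => by simpa using (h3 c).mp hc)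
      subst hS
      rfl
    | cons q rest =>
      obtain ⟨c, e⟩ := q
      have hrest_pw : rest.Pairwise (fun a b => a.1 ≤ b.1) := (List.pairwise_cons.mp h1).2
      have hhead : ∀ z ∈ rest, c ≤ z.1 := (List.pairwise_cons.mp h1).1
      have hcS : c ∈ S := (h3 c).mpr (by simp)
      cases S with
      | nil => exact absurd hcS (by simp)
      | cons s0 S' =>
        have hs0 : s0 = c := by
          have hm : s0 ∈ List.map Prod.fst ((c, e) :: rest) := (h3 s0).mp List.mem_cons_self
          have hcle : c ≤ s0 := by
            simp only [List.map_cons, List.mem_cons] at hm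
            rcases hm with h' | h'
            · exact h' ▸ le_refl _
            · obtain ⟨p, hp, rfl⟩ := List.mem_map.mp h'
              exact hhead p hp
          rcases List.mem_cons.mp hcS with h' | h'
          · exact h'.symm
          · exact absurd ((List.pairwise_cons.mp h2).1 c h') (not_lt_of_ge hcle)
        rw [hs0] at h2 h3 ⊢
        have hsub : (rest.dropWhile (fun p => p.1 == c)).Sublist rest := List.dropWhile_sublist _
        have hpw' : (rest.dropWhile (fun p => p.1 == c)).Pairwise (fun a b => a.1 ≤ b.1) :=
          hrest_pw.sublist hsub
        have hgt : ∀ p ∈ rest.dropWhile (fun p => p.1 == c), c < p.1 :=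
          dropWhile_gt c rest hrest_pw hhead
        have hL : pvRun none ((c, e) :: rest)
            = e :: pvRun none (rest.dropWhile (fun p => p.1 == c)) := by
          rw [show pvRun none ((c, e) :: rest) = e :: pvRun (some c) rest from by
            simp [pvRun], run_skip]
        have hlookup_tail : ∀ c', c ≠ c' →
            List.lookup c' ((c, e) :: rest)
              = List.lookup c' (rest.dropWhile (fun p => p.1 == c)) := by
          intro c' hne
          have hstep : List.lookup c' ((c, e) :: rest) = List.lookup c' rest := by
            simp only [List.lookup]
            rw [show (c' == c) = false from by simp [Ne.symm hne]]
          rw [hstep]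
          conv_lhs => rw [← List.takeWhile_append_dropWhile (p := fun p => p.1 == c) (l := rest)]
          rw [List.lookup_append,
            show List.lookup c' (rest.takeWhile (fun p => p.1 == c)) = none from by
              rw [List.lookup_eq_none_iff]
              intro p hp
              have hpc : p.1 = c := by simpa using List.mem_takeWhile_imp hp
              simp [bne_iff_ne, hpc, Ne.symm hne],
            Option.none_or]
        have hmem' : ∀ c', c' ∈ S' ↔ c' ∈ (rest.dropWhile (fun p => p.1 == c)).map Prod.fst := by
          intro c'
          constructor
          · intro hc'
            have hgt' : c < c' := (List.pairwise_cons.mp h2).1 c' hc'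
            have hq : c' ∈ ((c, e) :: rest).map Prod.fst := (h3 c').mp (List.mem_cons_of_mem _ hc')
            simp only [List.map_cons, List.mem_cons] at hq
            rcases hq with h' | h'
            · exact absurd h'.symm (ne_of_lt hgt')
            · rw [← List.takeWhile_append_dropWhile (p := fun p => p.1 == c) (l := rest),
                List.map_append, List.mem_append] at h'
              rcases h' with h'' | h''
              · obtain ⟨p, hp, rfl⟩ := List.mem_map.mp h''
                have hpc : p.1 = c := by simpa using List.mem_takeWhile_imp hp
                exact absurd hpc.symm (ne_of_lt hgt')
              · exact h''
          · intro hc'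
            obtain ⟨p, hp, rfl⟩ := List.mem_map.mp hc'
            have hcp : c < p.1 := hgt p hp
            have hmemS : p.1 ∈ c :: S' := (h3 p.1).mpr (by
              simp only [List.map_cons, List.mem_cons]
              exact Or.inr (List.mem_map_of_mem (hsub.mem hp)))
            rcases List.mem_cons.mp hmemS with h' | h'
            · exact absurd h'.symm (ne_of_lt hcp)
            · exact h'
        have hlen : (rest.dropWhile (fun p => p.1 == c)).length ≤ n := by
          have h4 := hsub.length_le
          have h5 : rest.length + 1 ≤ n + 1 := by simpa using hn
          omega
        have hmain := ih (rest.dropWhile (fun p => p.1 == c)) S' hlen hpw'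
          (List.pairwise_cons.mp h2).2 hmem'
        rw [hL, List.map_cons]
        congr 1
        · rw [show List.lookup c ((c, e) :: rest) = some e from by simp [List.lookup]]
          rfl
        · rw [hmain]
          apply List.map_congr_left
          intro c' hc'
          rw [hlookup_tail c' (ne_of_lt ((List.pairwise_cons.mp h2).1 c' hc'))]

theorem b_char (entries : List (List (String × String))) :
    dedupe_diagnostics_py_alt entries
      = (PySem.List.sorted (PySem.Set.ofList ((pvPairs entries).map Prod.fst)) (fun k => k) false).map
          (fun c => (List.lookup c (pvPairs entries)).getD []) := by
  have hstart : dedupe_diagnostics_py_alt entries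
      = pvRun none (PySem.List.sorted (pvPairs entries) (fun p => p.1) false) := by
    show (List.foldl _ ([], none) _).1 = _
    rw [foldl_eq_run]
    rfl
  rw [hstart]
  rw [run_spec (PySem.List.sorted (pvPairs entries) (fun p => p.1) false).length _ _ (le_refl _)
    (PySem.List.sorted_pairwise (pvPairs entries) (fun p => p.1))
    (PySem.List.sorted_ofList_pairwise_lt ((pvPairs entries).map Prod.fst))
    (by
      intro c
      rw [PySem.List.mem_sorted, PySem.Set.mem_ofList,
        ((PySem.List.sorted_perm (pvPairs entries) (fun p => p.1) false).map Prod.fst).mem_iff])]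
  apply List.map_congr_left
  intro c _
  rw [lookup_sorted]

-- ===== VERDICT (by name: the statement is the Claim_ definition above) =====
theorem dedupe_diagnostics_py_spec : Claim_equal_dedupe_diagnostics_py := by
  intro entries _
  unfold Spec_dedupe_diagnostics_py
  rw [a_char, b_char]
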